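-- pv_equiv track=rewrite | github.com/zakhij/euler | problems/26_reciprocal_cycles.py | get_max_length_reciprocal_cycles_under_n2
-- ===== SOURCE A (Python) =====
-- def get_max_length_reciprocal_cycles_under_n2(n: int) -> int:
--     max = 0
--     max_num = 0
--     for i in range(2, n):
--         cycle_count = check_cycle2(i)
--         if cycle_count > max:
--             max = cycle_count
--             max_num = i
--     return max_num
--
-- def check_cycle2(d: int) -> int:
--     remainders = {}
--     remainder = 1
--     position = 0
--
--     while remainder != 0 and remainder not in remainders:
--         remainders[remainder] = position
--         remainder = (remainder * 10) % d
--         position += 1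
--
--     if remainder == 0:
--         return 0
--     else:
--         return position - remainders[remainder]
-- ===== SOURCE B (Python) =====
-- def get_max_length_reciprocal_cycles_under_n2(n: int) -> int:
--     # Scan candidates downward; since a cycle of 1/d has length at most d-1,
--     # we can stop as soon as the remaining candidates cannot reach the best.
--     best = 0
--     best_num = 0
--     for i in reversed(range(2, n)):
--         if i <= best:
--             break
--         c = _cycle_length(i)
--         if c > 0 and c >= best:
--             best = c
--             best_num = i
--     return best_num
--
-- def _cycle_length(d: int) -> int:
--     remainders = {}
--     remainder = 1
--     position = 0
--     while remainder != 0 and remainder not in remainders: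
--         remainders[remainder] = position
--         remainder = (remainder * 10) % d
--         position += 1
--     if remainder == 0:
--         return 0
--     return position - remainders[remainder]
-- ===== Notes on version B (the rewrite author's own statement) =====
-- stated objective: faster
-- what changed: B scans candidates downward and stops as soon as the remaining candidates i satisfy i <= best, using the bound cycle(d) <= d-1, instead of A's full ascending scan of every d < n.
import Mathlib
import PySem

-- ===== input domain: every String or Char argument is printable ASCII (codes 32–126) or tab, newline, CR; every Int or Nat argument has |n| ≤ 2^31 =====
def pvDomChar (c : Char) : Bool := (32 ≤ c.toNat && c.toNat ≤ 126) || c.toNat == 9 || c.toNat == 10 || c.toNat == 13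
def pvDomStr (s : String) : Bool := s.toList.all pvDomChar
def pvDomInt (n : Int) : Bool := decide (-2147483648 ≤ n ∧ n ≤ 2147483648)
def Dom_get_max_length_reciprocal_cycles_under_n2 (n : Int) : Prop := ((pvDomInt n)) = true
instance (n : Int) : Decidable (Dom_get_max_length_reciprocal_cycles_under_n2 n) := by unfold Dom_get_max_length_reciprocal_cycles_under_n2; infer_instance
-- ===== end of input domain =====

-- B replaces A's ascending argmax scan by a descending scan that stops early
-- (a cycle of 1/d is shorter than d, so once i ≤ best nothing ahead can win or tie).

-- ===== PORT A =====
-- the while-loop of check_cycle2, as fuel recursion; fuel d.toNat + 1 never runs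
-- out (each iteration inserts a fresh key from {1,…,d-1}, so ≤ d-1 iterations).
-- Source B's helper _cycle_length is this same loop, ported once and shared.
def cycleLoop (d : Int) : Nat → PySem.Dict Int Int → Int → Int → Int
  | 0, _, _, _ => 0
  | fuel+1, remainders, remainder, position =>
      if remainder = 0 then 0
      else
        match remainders.get? remainder with
        | some p => position - p
        | none =>
            cycleLoop d fuel (remainders.insert remainder position)
              (PySem.Int.mod (remainder * 10) d) (position + 1)

def check_cycle2 (d : Int) : Int :=
  cycleLoop d (d.toNat + 1) PySem.Dict.empty 1 0

-- body of A's for-loop, state (max, max_num)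
def ascStep (s : Int × Int) (i : Int) : Int × Int :=
  let cycle_count := check_cycle2 i
  if cycle_count > s.1 then (cycle_count, i) else s

def get_max_length_reciprocal_cycles_under_n2 (n : Int) : Int :=
  ((PySem.List.pyRange 2 n 1).foldl ascStep (0, 0)).2

-- ===== PORT B =====
-- 'for i in reversed(range(2, n)): if i <= best: break; …'
def descLoop : List Int → Int → Int → Int
  | [], _, best_num => best_num
  | i :: rest, best, best_num =>
      if i ≤ best then best_num
      else
        let c := check_cycle2 i
        if 0 < c ∧ best ≤ c then descLoop rest c i else descLoop rest best best_num

def get_max_length_reciprocal_cycles_under_n2_alt (n : Int) : Int :=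
  descLoop (PySem.List.pyRange 2 n 1).reverse 0 0

-- ===== PRECONDITION & SPEC =====
def Spec_get_max_length_reciprocal_cycles_under_n2 (n : Int) (out : Int) : Prop := out = get_max_length_reciprocal_cycles_under_n2_alt n
instance (n : Int) (out : Int) : Decidable (Spec_get_max_length_reciprocal_cycles_under_n2 n out) := by unfold Spec_get_max_length_reciprocal_cycles_under_n2; infer_instance

-- ===== CLAIM (what is proved, stated in full; the proofs are below) =====
def Claim_equal_get_max_length_reciprocal_cycles_under_n2 : Prop := ∀ (n : Int), Dom_get_max_length_reciprocal_cycles_under_n2 n → Spec_get_max_length_reciprocal_cycles_under_n2 n (get_max_length_reciprocal_cycles_under_n2 n)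

-- ===== LEMMAS AND PROOFS =====

-- B's update step, as a fold step (proof-side view of descLoop's body)
def descStep (s : Int × Int) (i : Int) : Int × Int :=
  let c := check_cycle2 i
  if 0 < c ∧ s.1 ≤ c then (c, i) else s

-- pigeonhole: a dict with distinct keys drawn from {1,…,d-1} has size ≤ d-1
lemma dict_size_le (d : Int) (hd : 2 ≤ d) (dict : PySem.Dict Int Int)
    (hnd : dict.keys.Nodup) (hk : ∀ k ∈ dict.keys, 1 ≤ k ∧ k < d) :
    (dict.size : Int) ≤ d - 1 := by
  have hsub : dict.keys.toFinset ⊆ Finset.Ico 1 d := by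
    intro x hx
    have := hk x (List.mem_toFinset.1 hx)
    simp [Finset.mem_Ico]; omega
  have hcard : dict.keys.toFinset.card = dict.keys.length := List.toFinset_card_of_nodup hnd
  have hle : dict.keys.toFinset.card ≤ (Finset.Ico (1:Int) d).card := Finset.card_le_card hsub
  have hico : (Finset.Ico (1:Int) d).card = (d - 1).toNat := Int.card_Ico 1 d
  have hlen : dict.keys.length = dict.size := by
    simp [PySem.Dict.keys, PySem.Dict.size]
  omega

-- every value cycleLoop can return lies in [0, d-1]
lemma cycleLoop_bounds (d : Int) (hd : 2 ≤ d) :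
    ∀ (fuel : Nat) (dict : PySem.Dict Int Int) (rem pos : Int),
      dict.keys.Nodup →
      (∀ kv ∈ dict.items, (1 ≤ kv.1 ∧ kv.1 < d) ∧ (pos - dict.size ≤ kv.2 ∧ kv.2 < pos)) →
      0 ≤ rem → rem < d →
      0 ≤ cycleLoop d fuel dict rem pos ∧ cycleLoop d fuel dict rem pos ≤ d - 1 := by
  intro fuel
  induction fuel with
  | zero => intro dict rem pos _ _ _ _; simp [cycleLoop]; omega
  | succ fuel ih =>
      intro dict rem pos hnd hinv hr0 hrd
      rw [cycleLoop]
      split_ifs with hz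
      · omega
      · have hkeys : ∀ k ∈ dict.keys, 1 ≤ k ∧ k < d := by
          intro k hk
          obtain ⟨v, hv⟩ : ∃ v, (k, v) ∈ dict.items := by
            simp only [PySem.Dict.keys, List.mem_map] at hk
            obtain ⟨p, hp, rfl⟩ := hk
            exact ⟨p.2, hp⟩
          exact (hinv _ hv).1
        have hsize := dict_size_le d hd dict hnd hkeys
        cases hget : dict.get? rem with
        | some p =>
            have hmem := PySem.Dict.mem_items_of_get?_eq_some dict hget
            have := hinv _ hmem
            simp only
            constructor <;> omega
        | none =>
            simp only
            apply ih
            · exact PySem.Dict.nodup_keys_insert dict rem pos hnd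
            · intro kv hkv
              rcases (PySem.Dict.mem_items_insert dict rem pos kv).1 hkv with h | ⟨h, _⟩
              · subst h
                have hsz : (dict.insert rem pos).size = dict.size + 1 := by
                  rw [PySem.Dict.size_insert, if_neg]
                  rw [PySem.Dict.contains_eq_isSome_get?, hget]
                  simp
                constructor
                · constructor <;> omega
                · rw [hsz]; push_cast; omega
              · have := hinv _ h
                have hsz : (dict.insert rem pos).size = dict.size + 1 := by
                  rw [PySem.Dict.size_insert, if_neg]
                  rw [PySem.Dict.contains_eq_isSome_get?, hget]
                  simp
                constructor
                · exact this.1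
                · rw [hsz]; push_cast; omega
            · exact PySem.Int.mod_nonneg _ (by omega)
            · exact PySem.Int.mod_lt _ (by omega)

lemma check_cycle2_bounds (d : Int) (hd : 2 ≤ d) :
    0 ≤ check_cycle2 d ∧ check_cycle2 d ≤ d - 1 := by
  unfold check_cycle2
  apply cycleLoop_bounds d hd
  · simp [PySem.Dict.keys, PySem.Dict.empty]
  · intro kv hkv
    exact absurd hkv (by simp [PySem.Dict.empty])
  · norm_num
  · omega

-- states reached by A's fold keep a nonnegative running maximum
lemma foldl_ascStep_fst_nonneg (l : List Int) (s : Int × Int) (hs : 0 ≤ s.1) :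
    0 ≤ (l.foldl ascStep s).1 := by
  induction l generalizing s with
  | nil => exact hs
  | cons a l ih =>
      apply ih
      simp only [ascStep]
      split_ifs with h
      · simp; omega
      · exact hs

-- the two step functions commute past each other (a processed before c)
lemma step_comm (s : Int × Int) (a c : Int) (hs : 0 ≤ s.1) :
    ascStep (descStep s a) c = descStep (ascStep s c) a := by
  obtain ⟨v, k⟩ := s
  simp only [ascStep, descStep]
  split_ifs <;> simp_all [Prod.ext_iff] <;> omega

-- pulling one descStep out of an ascending fold
lemma foldl_asc_descStep (l : List Int) (a : Int) (s : Int × Int) (hs : 0 ≤ s.1) :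
    l.foldl ascStep (descStep s a) = descStep (l.foldl ascStep s) a := by
  induction l using List.reverseRecOn generalizing s with
  | nil => rfl
  | append_singleton l c ih =>
      simp only [List.foldl_append, List.foldl_cons, List.foldl_nil]
      rw [ih s hs, step_comm _ _ _ (foldl_ascStep_fst_nonneg l s hs)]

-- A's ascending fold equals B's descending fold
lemma asc_eq_desc (l : List Int) :
    l.foldl ascStep ((0 : Int), (0 : Int)) = l.reverse.foldl descStep (0, 0) := by
  induction l with
  | nil => rfl
  | cons a l ih =>
      simp only [List.foldl_cons, List.reverse_cons, List.foldl_append, List.foldl_nil]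
      rw [← ih]
      have h0 : ascStep ((0:Int),(0:Int)) a = descStep (0, 0) a := by
        simp only [ascStep, descStep]
        split_ifs <;> simp_all <;> omega
      rw [h0]
      exact foldl_asc_descStep l a (0, 0) (le_refl 0)

-- once every remaining candidate is ≤ best, the descending fold is inert
lemma foldl_descStep_inert (l : List Int) (s : Int × Int)
    (h : ∀ j ∈ l, 2 ≤ j ∧ j ≤ s.1) :
    l.foldl descStep s = s := by
  induction l with
  | nil => rfl
  | cons j l ih =>
      have hj := h j (List.mem_cons_self)
      have hc := (check_cycle2_bounds j hj.1).2
      have hstep : descStep s j = s := by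
        simp only [descStep]
        rw [if_neg]; omega
      rw [List.foldl_cons, hstep]
      exact ih (fun x hx => h x (List.mem_cons_of_mem _ hx))

-- the early-exit loop computes the full descending fold
lemma descLoop_eq_foldl (l : List Int) (best bn : Int)
    (h2 : ∀ j ∈ l, 2 ≤ j) (hsort : l.Pairwise (· > ·)) :
    descLoop l best bn = (l.foldl descStep (best, bn)).2 := by
  induction l generalizing best bn with
  | nil => rfl
  | cons i l ih =>
      have hi := h2 i (List.mem_cons_self)
      have h2' : ∀ j ∈ l, 2 ≤ j := fun x hx => h2 x (List.mem_cons_of_mem _ hx)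
      have hlt : ∀ j ∈ l, j < i := fun x hx => (List.pairwise_cons.1 hsort).1 x hx
      have hsort' := (List.pairwise_cons.1 hsort).2
      rw [List.foldl_cons]
      by_cases hbr : i ≤ best
      · have hstep : descStep (best, bn) i = (best, bn) := by
          have := (check_cycle2_bounds i hi).2
          simp only [descStep]
          rw [if_neg]; omega
        rw [hstep, foldl_descStep_inert l (best, bn)
          (fun j hj => ⟨h2' j hj, by have := hlt j hj; omega⟩)]
        simp only [descLoop, if_pos hbr]
      · have hcond : descLoop (i :: l) best bn =
            if 0 < check_cycle2 i ∧ best ≤ check_cycle2 i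
            then descLoop l (check_cycle2 i) i else descLoop l best bn := by
          simp only [descLoop, if_neg hbr]
        rw [hcond]
        simp only [descStep]
        split_ifs with hc
        · exact ih (check_cycle2 i) i h2' hsort'
        · exact ih best bn h2' hsort'

-- ===== VERDICT (by name: the statement is the Claim_ definition above) =====
theorem get_max_length_reciprocal_cycles_under_n2_spec : Claim_equal_get_max_length_reciprocal_cycles_under_n2 := by
  intro n _
  unfold Spec_get_max_length_reciprocal_cycles_under_n2
  unfold get_max_length_reciprocal_cycles_under_n2 get_max_length_reciprocal_cycles_under_n2_alt
  rw [asc_eq_desc, descLoop_eq_foldl]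
  · intro j hj
    exact ((PySem.List.mem_pyRange_one).1 (List.mem_reverse.1 hj)).1
  · exact (List.pairwise_reverse).2 (by
      simpa using PySem.List.pairwise_lt_pyRange_one 2 n)
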